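-- pv_equiv track=rewrite | github.com/flower-go/DiplomaThesis | code/morphodita-research/morpho_dataset.py | _min_edit_script
-- ===== SOURCE A (Python) =====
-- def _min_edit_script(source, target):
--     a = [[(len(source) + len(target) + 1, None)] * (len(target) + 1) for _ in range(len(source) + 1)]
--     for i in range(0, len(source) + 1):
--         for j in range(0, len(target) + 1):
--             if i == 0 and j == 0:
--                 a[i][j] = (0, "")
--             else:
--                 if i and a[i - 1][j][0] < a[i][j][0]:
--                     a[i][j] = (a[i - 1][j][0] + 1, a[i - 1][j][1] + "-")
--                 if j and a[i][j - 1][0] < a[i][j][0]: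
--                     a[i][j] = (a[i][j - 1][0] + 1, a[i][j - 1][1] + "+" + target[j - 1])
--     return a[-1][-1][1]
-- ===== SOURCE B (Python) =====
-- def _min_edit_script(source, target):
--     # A's DP always prefers "come from the left" (a strict-< typo drops the +1),
--     # so the chosen script is fixed: delete every source char, then insert every
--     # target char. Closed form, O(n+m).
--     return '-' * len(source) + ''.join('+' + c for c in target)
-- ===== Notes on version B (the rewrite author's own statement) =====
-- stated objective: faster
-- what changed: Replaced the O(n*m) dynamic-programming table of (cost, script) pairs by the closed form '-'*len(source) + ''.join('+'+c for c in target), which is the script A's table always selects.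
import Mathlib
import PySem

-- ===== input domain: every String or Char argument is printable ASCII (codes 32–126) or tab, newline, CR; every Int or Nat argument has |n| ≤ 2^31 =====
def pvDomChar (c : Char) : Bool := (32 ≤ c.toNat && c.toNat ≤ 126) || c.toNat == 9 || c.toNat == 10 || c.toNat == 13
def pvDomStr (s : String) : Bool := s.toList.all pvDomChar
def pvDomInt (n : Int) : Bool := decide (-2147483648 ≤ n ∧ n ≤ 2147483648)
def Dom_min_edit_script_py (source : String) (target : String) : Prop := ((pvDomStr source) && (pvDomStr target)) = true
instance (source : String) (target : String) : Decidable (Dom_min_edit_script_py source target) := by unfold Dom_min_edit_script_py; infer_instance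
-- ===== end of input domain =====

-- B replaces A's O(n*m) DP table of (cost, script) pairs by the closed form the DP
-- always selects: delete all of source, then insert all of target (objective: faster).

-- ===== PORT A =====
-- a DP cell: (cost, script); the initial `None` script is `none`
-- read a[i][j] (all reads A performs are in range; the defaults are never used)
def pvGes (a : List (List (Int × Option (List Char)))) (i j : Nat) : Int × Option (List Char) :=
  (a.getD i []).getD j (0, none)

-- write a[i][j] := v
def pvSetc (a : List (List (Int × Option (List Char)))) (i j : Nat)
    (v : Int × Option (List Char)) : List (List (Int × Option (List Char))) :=
  a.set i ((a.getD i []).set j v)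

-- the body of A's double loop at cell (i, j); branches in A's order.
-- `a[i-1][j][1] + "-"` would raise TypeError on a `None` script (unreachable in A):
-- ported as Option.map, which keeps `none`.  `target[j-1]` is read only when
-- 1 ≤ j ≤ len(target), so the in-range `getD` is exact there.
def pvStep (t : List Char) (a : List (List (Int × Option (List Char)))) (i j : Nat) :
    List (List (Int × Option (List Char))) :=
  if i = 0 ∧ j = 0 then pvSetc a i j (0, some [])
  else
    let a1 := if i ≠ 0 ∧ (pvGes a (i-1) j).1 < (pvGes a i j).1
      then pvSetc a i j ((pvGes a (i-1) j).1 + 1, (pvGes a (i-1) j).2.map (fun p => p ++ ['-']))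
      else a
    if j ≠ 0 ∧ (pvGes a1 i (j-1)).1 < (pvGes a1 i j).1
      then pvSetc a1 i j ((pvGes a1 i (j-1)).1 + 1,
             (pvGes a1 i (j-1)).2.map (fun p => p ++ '+' :: [t.getD (j-1) ' ']))
      else a1

def min_edit_script_py (source : String) (target : String) : String :=
  let s := source.toList
  let t := target.toList
  let n := s.length
  let m := t.length
  let init : List (List (Int × Option (List Char))) :=
    List.replicate (n+1) (List.replicate (m+1) (((n : Int) + m + 1, none)))
  let final := (List.range (n+1)).foldl
    (fun a i => (List.range (m+1)).foldl (fun a j => pvStep t a i j) a) init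
  String.mk ((pvGes final n m).2.getD [])   -- a[-1][-1][1] (always a string in A)

-- ===== PORT B =====
def min_edit_script_py_alt (source : String) (target : String) : String :=
  String.mk (List.replicate source.toList.length '-'
    ++ target.toList.flatMap (fun c => ['+', c]))

-- ===== PRECONDITION & SPEC =====
def Spec_min_edit_script_py (source : String) (target : String) (out : String) : Prop := out = min_edit_script_py_alt source target
instance (source : String) (target : String) (out : String) : Decidable (Spec_min_edit_script_py source target out) := by unfold Spec_min_edit_script_py; infer_instance

-- ===== CLAIM (what is proved, stated in full; the proofs are below) =====
def Claim_equal_min_edit_script_py : Prop := ∀ (source : String) (target : String), Dom_min_edit_script_py source target → Spec_min_edit_script_py source target (min_edit_script_py source target)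

-- ===== LEMMAS AND PROOFS =====

-- the intended final value of cell (i, j)
def pvE (t : List Char) (i j : Nat) : Int × Option (List Char) :=
  ((i : Int) + j, some (List.replicate i '-' ++ (t.take j).flatMap (fun c => ['+', c])))

-- matrix state just before A processes cell (i, j): cells before (i, j) in loop order
-- are finished, the rest still hold the sentinel
def pvDesc (t : List Char) (n m i j : Nat) : List (List (Int × Option (List Char))) :=
  (List.range (n+1)).map (fun i' => (List.range (m+1)).map (fun j' =>
    if i' < i ∨ (i' = i ∧ j' < j) then pvE t i' j' else ((n : Int) + m + 1, none)))

theorem pvGes_desc (t : List Char) (n m i j i' j' : Nat) (hi : i' ≤ n) (hj : j' ≤ m) :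
    pvGes (pvDesc t n m i j) i' j' =
      if i' < i ∨ (i' = i ∧ j' < j) then pvE t i' j' else ((n : Int) + m + 1, none) := by
  simp [pvGes, pvDesc, List.getD, List.getElem?_map, List.getElem?_range,
    Nat.lt_succ_of_le hi, Nat.lt_succ_of_le hj]

theorem pvSetc_desc (t : List Char) (n m i j : Nat) (hi : i ≤ n) (hj : j ≤ m) :
    pvSetc (pvDesc t n m i j) i j (pvE t i j) = pvDesc t n m i (j+1) := by
  have hrow : (pvDesc t n m i j).getD i [] = (List.range (m+1)).map (fun j' =>
      if i < i ∨ (i = i ∧ j' < j) then pvE t i j' else ((n : Int) + m + 1, none)) := by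
    simp [pvDesc, List.getD, Nat.lt_succ_of_le hi]
  unfold pvSetc
  rw [hrow]
  apply List.ext_getElem
  · simp [pvDesc]
  · intro k h1 h2
    rw [List.getElem_set]
    split
    · next heq =>
      subst heq
      simp only [pvDesc, List.getElem_map, List.getElem_range]
      apply List.ext_getElem
      · simp
      · intro l hl1 hl2
        simp only [List.length_map, List.length_range, List.length_set] at hl1 hl2
        rw [List.getElem_set]
        simp only [List.getElem_map, List.getElem_range]
        split
        · next heq2 => subst heq2; simp
        · next hne => congr 1; simp only [eq_iff_iff, true_and]; omega
    · next hne =>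
      simp only [pvDesc, List.getElem_map, List.getElem_range]
      apply List.map_congr_left
      intro l hl
      congr 1
      simp only [eq_iff_iff]
      omega

theorem pvDesc_next_row (t : List Char) (n m i : Nat) :
    pvDesc t n m i (m+1) = pvDesc t n m (i+1) 0 := by
  unfold pvDesc
  apply List.map_congr_left
  intro i' hi'
  apply List.map_congr_left
  intro j' hj'
  simp only [List.mem_range] at hi' hj'
  congr 1
  simp only [eq_iff_iff]
  omega

-- setting the same cell twice keeps the last value
theorem pvSetc_setc (a : List (List (Int × Option (List Char)))) (i j : Nat)
    (v w : Int × Option (List Char)) (hi : i < a.length) :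
    pvSetc (pvSetc a i j v) i j w = pvSetc a i j w := by
  simp [pvSetc, List.getD, List.getElem?_set_self hi, List.set_set]

theorem pvGes_setc_ne_col (a : List (List (Int × Option (List Char)))) (i j j' : Nat)
    (v : Int × Option (List Char)) (hi : i < a.length) (h : j ≠ j') :
    pvGes (pvSetc a i j v) i j' = pvGes a i j' := by
  simp [pvGes, pvSetc, List.getD, List.getElem?_set_self hi, List.getElem?_set_ne h]

theorem pvGes_setc_self (a : List (List (Int × Option (List Char)))) (i j : Nat)
    (v : Int × Option (List Char)) (hi : i < a.length) (hj : j < (a.getD i []).length) :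
    pvGes (pvSetc a i j v) i j = v := by
  simp [pvGes, pvSetc, List.getD] at hj ⊢
  simp [List.getElem?_set_self hi, List.getElem?_set_self hj]

theorem pvDesc_length (t : List Char) (n m i j : Nat) : (pvDesc t n m i j).length = n + 1 := by
  simp [pvDesc]

theorem pvDesc_row_length (t : List Char) (n m i j i' : Nat) (hi : i' ≤ n) :
    ((pvDesc t n m i j).getD i' []).length = m + 1 := by
  simp [pvDesc, List.getD, Nat.lt_succ_of_le hi]

-- the key step lemma: processing cell (i, j) finishes exactly that cell
theorem pvStep_desc (t : List Char) (n m i j : Nat) (hm : t.length = m)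
    (hi : i ≤ n) (hj : j ≤ m) :
    pvStep t (pvDesc t n m i j) i j = pvDesc t n m i (j+1) := by
  have hlen : i < (pvDesc t n m i j).length := by rw [pvDesc_length]; omega
  have hrlen : j < ((pvDesc t n m i j).getD i []).length := by
    rw [pvDesc_row_length t n m i j i hi]; omega
  have gij : pvGes (pvDesc t n m i j) i j = ((n : Int) + m + 1, none) := by
    rw [pvGes_desc t n m i j i j hi hj]; simp
  have hEinsert : ∀ i', j ≠ 0 →
      ((pvE t i' (j-1)).1 + 1, (pvE t i' (j-1)).2.map (fun p => p ++ '+' :: [t.getD (j-1) ' '])) = pvE t i' j := by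
    intro i' hjne
    simp only [pvE, Option.map_some, Prod.mk.injEq]
    constructor
    · push_cast; omega
    · have hjl : j - 1 < t.length := by omega
      have ht : List.take j t = List.take (j-1) t ++ [t[j-1]] := by
        conv_lhs => rw [show j = (j-1) + 1 by omega]
        rw [List.take_succ, List.getElem?_eq_getElem hjl]
        simp
      rw [ht]
      simp [List.flatMap_append, List.getD, List.getElem?_eq_getElem hjl, List.append_assoc]
      rw [List.take_succ, List.getElem?_eq_getElem hjl, List.flatMap_append]
      simp only [Option.toList_some, List.flatMap_cons, List.flatMap_nil, List.append_nil]
  by_cases h0 : i = 0 ∧ j = 0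
  · obtain ⟨rfl, rfl⟩ := h0
    unfold pvStep
    rw [if_pos ⟨rfl, rfl⟩, show ((0:Int), some ([] : List Char)) = pvE t 0 0 by simp [pvE]]
    exact pvSetc_desc t n m 0 0 hi hj
  · unfold pvStep
    rw [if_neg h0]
    simp only []   -- zeta-reduce the `let a1`
    rcases Nat.eq_zero_or_pos i with hi0 | hipos
    · -- i = 0, hence j ≠ 0: the up branch is skipped, the left branch fires
      subst hi0
      have hjne : ¬j = 0 := by tauto
      simp only [ne_eq, eq_self_iff_true, not_true, false_and, if_false]
      have gl : pvGes (pvDesc t n m 0 j) 0 (j-1) = pvE t 0 (j-1) := by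
        rw [pvGes_desc t n m 0 j 0 (j-1) (by omega) (by omega)]
        simp; omega
      rw [gl, gij, if_pos ⟨hjne, by simp only [pvE]; push_cast; omega⟩,
        hEinsert 0 hjne]
      exact pvSetc_desc t n m 0 j hi hj
    · -- i > 0: the up branch fires, then (if j > 0) the left branch overwrites
      have hine : i ≠ 0 := by omega
      have gup : pvGes (pvDesc t n m i j) (i-1) j = pvE t (i-1) j := by
        rw [pvGes_desc t n m i j (i-1) j (by omega) hj]
        simp; omega
      rw [gup, gij]
      have hlt : (pvE t (i-1) j).1 < (((n : Int) + m + 1, (none : Option (List Char)))).1 := by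
        simp only [pvE]; push_cast; omega
      have hc := eq_true_intro (And.intro hine hlt)
      simp only [hc, if_true]
      rcases Nat.eq_zero_or_pos j with hj0 | hjpos
      · -- j = 0: only the up branch; its value is already pvE t i 0
        subst hj0
        simp only [ne_eq, eq_self_iff_true, not_true, false_and, if_false]
        rw [show ((pvE t (i-1) 0).1 + 1, (pvE t (i-1) 0).2.map (fun p => p ++ ['-'])) = pvE t i 0 by
          simp only [pvE, List.take_zero, List.flatMap_nil, List.append_nil, Option.map_some,
            Prod.mk.injEq]
          refine ⟨by push_cast; omega, ?_⟩
          rw [show i = (i-1) + 1 by omega]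
          simp [List.replicate_succ']]
        exact pvSetc_desc t n m i 0 hi hj
      · -- j > 0: the left branch reads the finished cell (i, j-1) and overwrites
        have hjne : ¬j = 0 := by omega
        rw [pvGes_setc_ne_col _ i j (j-1) _ hlen (by omega),
          pvGes_setc_self _ i j _ hlen hrlen]
        have gl : pvGes (pvDesc t n m i j) i (j-1) = pvE t i (j-1) := by
          rw [pvGes_desc t n m i j i (j-1) hi (by omega)]
          simp; omega
        rw [gl, if_pos ⟨hjne, by simp only [pvE]; push_cast; omega⟩, hEinsert i hjne,
          pvSetc_setc _ _ _ _ _ hlen]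
        exact pvSetc_desc t n m i j hi hj

-- the inner loop over j finishes row i
theorem pvInner (t : List Char) (n m i : Nat) (hm : t.length = m) (hi : i ≤ n) :
    ∀ k, k ≤ m + 1 →
      (List.range k).foldl (fun a j => pvStep t a i j) (pvDesc t n m i 0) = pvDesc t n m i k := by
  intro k
  induction k with
  | zero => intro _; simp
  | succ k ih =>
    intro hk
    rw [show List.range (k+1) = List.range k ++ [k] from List.range_succ, List.foldl_append, ih (by omega)]
    simp only [List.foldl_cons, List.foldl_nil]
    exact pvStep_desc t n m i k hm hi (by omega)

-- the outer loop over i finishes the whole table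
theorem pvOuter (t : List Char) (n m : Nat) (hm : t.length = m) :
    ∀ k, k ≤ n + 1 →
      (List.range k).foldl (fun a i => (List.range (m+1)).foldl (fun a j => pvStep t a i j) a)
        (pvDesc t n m 0 0) = pvDesc t n m k 0 := by
  intro k
  induction k with
  | zero => intro _; simp
  | succ k ih =>
    intro hk
    rw [show List.range (k+1) = List.range k ++ [k] from List.range_succ, List.foldl_append, ih (by omega)]
    simp only [List.foldl_cons, List.foldl_nil]
    rw [pvInner t n m k hm (by omega) (m+1) (le_refl _)]
    exact pvDesc_next_row t n m k

theorem pvInit_eq_desc (t : List Char) (n m : Nat) :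
    (List.replicate (n+1) (List.replicate (m+1) (((n : Int) + m + 1, (none : Option (List Char)))))) =
      pvDesc t n m 0 0 := by
  apply List.ext_getElem
  · simp [pvDesc]
  · intro k h1 h2
    simp only [pvDesc, List.getElem_replicate, List.getElem_map, List.getElem_range]
    apply List.ext_getElem
    · simp
    · intro l hl1 hl2
      simp only [List.length_replicate, List.length_map, List.length_range] at hl1 hl2
      simp [List.getElem_replicate]

-- ===== VERDICT (by name: the statement is the Claim_ definition above) =====
theorem min_edit_script_py_spec : Claim_equal_min_edit_script_py := by
  intro source target _
  unfold Spec_min_edit_script_py min_edit_script_py min_edit_script_py_alt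
  simp only
  set s := source.toList
  set t := target.toList
  rw [pvInit_eq_desc t s.length t.length,
    pvOuter t s.length t.length rfl (s.length + 1) (le_refl _),
    pvGes_desc t s.length t.length (s.length + 1) 0 s.length t.length (le_refl _) (le_refl _)]
  simp [pvE]
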